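-- pv_equiv track=rewrite | github.com/delf1/aoc2022 | day6/day6.py | solve
-- ===== SOURCE A (Python) =====
-- from collections import deque, Counter
--
-- def solve(line, length):
--     dq = deque(line[:length])
--     counts = Counter(dq)
--     i = length
--     while len(counts) < length:
--         rem = dq.popleft()
--         counts[rem] -= 1
--         if counts[rem] == 0:
--             del counts[rem]
--         counts[line[i]] += 1
--         dq.append(line[i])
--         i += 1
--     return i
-- ===== SOURCE B (Python) =====
-- def solve(line, length):
--     # Brute-force search over starting positions: the answer is (first j whose
--     # window line[j:j+length] contains `length` distinct characters) + length.
--     j = next(j for j in range(len(line) + 1)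
--              if len(set(line[j:j + length])) >= length)
--     return j + length
-- ===== Notes on version B (the rewrite author's own statement) =====
-- stated objective: alternative
-- what changed: Replaces A's incremental sliding window (deque plus a Counter maintained by popleft/append with manual decrement-and-delete bookkeeping) by a stateless brute-force search: a generator scans candidate start positions j and returns the first j whose slice line[j:j+length] has length distinct characters, plus length.
import Mathlib
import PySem

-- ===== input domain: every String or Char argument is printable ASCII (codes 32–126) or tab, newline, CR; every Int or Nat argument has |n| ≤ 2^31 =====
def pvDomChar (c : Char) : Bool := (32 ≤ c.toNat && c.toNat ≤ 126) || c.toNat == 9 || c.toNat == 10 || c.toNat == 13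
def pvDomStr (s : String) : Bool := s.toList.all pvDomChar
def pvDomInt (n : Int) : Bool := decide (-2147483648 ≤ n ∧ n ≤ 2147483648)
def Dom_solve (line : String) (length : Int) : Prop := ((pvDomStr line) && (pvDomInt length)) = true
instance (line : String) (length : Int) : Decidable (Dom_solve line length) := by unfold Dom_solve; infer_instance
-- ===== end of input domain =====

-- B replaces A's incremental sliding window (deque + maintained Counter) by a stateless
-- brute-force search over start positions: the first j with line[j:j+length] all distinct,
-- plus length. Same return value wherever A returns (both raise outside Pre_solve).

-- ===== PORT A =====
-- A's while loop as fuel recursion; the escapes (fuel out, empty popleft, line[i] IndexError)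
-- return the current i — all lie outside Pre_solve (Python raises there).
def solveLoopA (line : List Char) : Nat → List Char → PySem.Dict Char Int → Int → Int → Int
  | 0, _, _, i, _ => i
  | fuel + 1, dq, counts, i, length =>
    if (PySem.Dict.size counts : Int) < length then
      match dq with
      | [] => i                                   -- dq.popleft() raises IndexError
      | rem :: dqtail =>
        let c1 := counts.modify rem 0 (· - 1)     -- counts[rem] -= 1
        let c2 := if c1.getD rem 0 == 0 then c1.erase rem else c1   -- if counts[rem]==0: del
        match PySem.List.pyGet? line i with
        | none => i                               -- line[i] raises IndexError
        | some x =>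
          solveLoopA line fuel (dqtail ++ [x]) (c2.modify x 0 (· + 1)) (i + 1) length
    else i

def solve (line : String) (length : Int) : Int :=
  let dq := PySem.List.slice line.toList none (some length)   -- deque(line[:length])
  solveLoopA line.toList (line.toList.length + 1) dq (PySem.Dict.counter dq) length length

-- ===== PORT B =====
-- next(j for j in range(len(line)+1) if len(set(line[j:j+length])) >= length), then j + length.
def solve_alt (line : String) (length : Int) : Int :=
  match (PySem.List.pyRange 0 ((line.toList.length : Int) + 1) 1).find?
      (fun j => decide (length ≤ ((PySem.Set.ofList
          (PySem.List.slice line.toList (some j) (some (j + length)))).length : Int))) with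
  | some j => j + length
  | none => 0                                     -- next() raises StopIteration here; outside Pre_solve

-- ===== PRECONDITION & SPEC =====
-- Pre_solve = exactly the inputs where Python A returns: length ≤ 0 (the loop body never runs),
-- or some length-sized window of the string has all-distinct characters (A raises IndexError
-- otherwise, and B's next() raises StopIteration there).
def Pre_solve (line : String) (length : Int) : Prop :=
  length ≤ 0 ∨ ∃ j ∈ List.range (line.toList.length + 1),
    j + length.toNat ≤ line.toList.length ∧ ((line.toList.drop j).take length.toNat).Nodup

instance (line : String) (length : Int) : Decidable (Pre_solve line length) := by
  unfold Pre_solve; infer_instance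

def pvWitness_solve : String × Int := ("abcd", 4)

def Spec_solve (line : String) (length : Int) (out : Int) : Prop := out = solve_alt line length
instance (line : String) (length : Int) (out : Int) : Decidable (Spec_solve line length out) := by
  unfold Spec_solve; infer_instance

-- ===== CLAIM (what is proved, stated in full; the proofs are below) =====
def Claim_equal_solve : Prop := ∀ (line : String) (length : Int),
  Dom_solve line length → Pre_solve line length → Spec_solve line length (solve line length)

-- ===== LEMMAS AND PROOFS =====

-- proof-only helper: A's loop with the Counter replaced by recomputing the set size of the window
def solveLoopW (line : List Char) : Nat → List Char → Int → Int → Int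
  | 0, _, i, _ => i
  | fuel + 1, w, i, length =>
    if ((PySem.Set.ofList w).length : Int) < length then
      match w with
      | [] => i
      | _ :: wt =>
        match PySem.List.pyGet? line i with
        | none => i
        | some x => solveLoopW line fuel (wt ++ [x]) (i + 1) length
    else i

-- invariant: counts is the (order-forgotten) Counter of the window dq
def CntInv (dq : List Char) (counts : PySem.Dict Char Int) : Prop :=
  counts.keys.Nodup ∧ (∀ c, counts.getD c 0 = (dq.count c : Int)) ∧
  (∀ c, c ∈ counts.keys ↔ c ∈ dq)

theorem keys_erase {κ ν : Type} [BEq κ] (d : PySem.Dict κ ν) (k : κ) :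
    (d.erase k).keys = d.keys.filter (fun c => !c == k) := by
  cases d with
  | mk items =>
    induction items with
    | nil => rfl
    | cons p rest ih =>
      simp only [PySem.Dict.erase, PySem.Dict.keys, List.filter_cons, List.map_cons] at *
      by_cases h : (!p.1 == k) = true <;> simp [h, ih]

theorem find?_filter_ne {κ ν : Type} [BEq κ] [LawfulBEq κ] (items : List (κ × ν)) (k c : κ)
    (h : c ≠ k) :
    List.find? (fun p => p.1 == c) (items.filter (fun p => !p.1 == k)) =
      List.find? (fun p => p.1 == c) items := by
  induction items with
  | nil => rfl
  | cons p rest ih =>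
    rw [List.filter_cons]
    by_cases hpk : p.1 = k
    · have h1 : (!p.1 == k) = false := by simp [hpk]
      have h2 : (p.1 == c) = false := by simp [hpk]; intro he; exact h he.symm
      rw [h1]
      simp only [Bool.false_eq_true, if_false, List.find?_cons, h2, ih]
    · have h1 : (!p.1 == k) = true := by simp [hpk]
      rw [h1]
      simp only [if_true, List.find?_cons, ih]

theorem get?_erase_self {κ ν : Type} [BEq κ] [LawfulBEq κ] (d : PySem.Dict κ ν) (k : κ) :
    (d.erase k).get? k = none := by
  have : List.find? (fun p => p.1 == k) (d.items.filter (fun p => !p.1 == k)) = none := by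
    apply List.find?_eq_none.2
    intro p hp
    have := (List.mem_filter.1 hp).2
    simpa using this
  simp only [PySem.Dict.erase, PySem.Dict.get?, this, Option.map_none]

theorem get?_erase_of_ne {κ ν : Type} [BEq κ] [LawfulBEq κ] (d : PySem.Dict κ ν) (k c : κ)
    (h : c ≠ k) : (d.erase k).get? c = d.get? c := by
  simp only [PySem.Dict.erase, PySem.Dict.get?, find?_filter_ne d.items k c h]

theorem mem_keys_erase {κ ν : Type} [BEq κ] [LawfulBEq κ] (d : PySem.Dict κ ν) (k c : κ) :
    c ∈ (d.erase k).keys ↔ c ∈ d.keys ∧ c ≠ k := by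
  rw [keys_erase, List.mem_filter]
  simp

theorem size_eq_setLen (dq : List Char) (counts : PySem.Dict Char Int)
    (h : CntInv dq counts) : PySem.Dict.size counts = (PySem.Set.ofList dq).length := by
  obtain ⟨hnd, _, hmem⟩ := h
  have hperm : List.Perm counts.keys (PySem.Set.ofList dq) := by
    rw [List.perm_ext_iff_of_nodup hnd (PySem.Set.nodup_ofList dq)]
    intro a; rw [PySem.Set.mem_ofList]; exact hmem a
  simpa [PySem.Dict.size, PySem.Dict.keys] using hperm.length_eq

theorem cnt_step (rem x : Char) (dt : List Char) (counts : PySem.Dict Char Int)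
    (h : CntInv (rem :: dt) counts) :
    CntInv (dt ++ [x])
      (((if (counts.modify rem 0 (· - 1)).getD rem 0 == 0
          then (counts.modify rem 0 (· - 1)).erase rem
          else counts.modify rem 0 (· - 1)).modify x 0 (· + 1))) := by
  obtain ⟨hnd, hcnt, hmem⟩ := h
  set c1 := counts.modify rem 0 (· - 1) with hc1
  have hc1get : ∀ c, c1.getD c 0 = if c = rem then (counts.getD rem 0) - 1 else counts.getD c 0 := by
    intro c; rw [hc1, PySem.Dict.getD_modify]
  have hc1rem : c1.getD rem 0 = (dt.count rem : Int) := by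
    rw [hc1get rem, if_pos rfl, hcnt rem]; simp [List.count_cons_self]
  have hc1mem : ∀ c, c ∈ c1.keys ↔ c = rem ∨ c ∈ counts.keys := by
    intro c; rw [hc1, PySem.Dict.modify, PySem.Dict.mem_keys_insert]
  have hc1nd : c1.keys.Nodup := PySem.Dict.nodup_keys_insert _ _ _ hnd
  set c2 := if c1.getD rem 0 == 0 then c1.erase rem else c1 with hc2
  have hc2nd : c2.keys.Nodup := by
    rw [hc2]; split
    · rw [keys_erase]; exact hc1nd.filter _
    · exact hc1nd
  have hc2get : ∀ c, c2.getD c 0 = (dt.count c : Int) := by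
    intro c
    by_cases hcr : c = rem
    · subst hcr
      rw [hc2]; split
      · next hz =>
          have h0 : c1.getD c 0 = 0 := by simpa using hz
          rw [PySem.Dict.getD, get?_erase_self]
          rw [hc1rem] at h0
          simp only [Option.getD_none]
          omega
      · exact hc1rem
    · have hcr' : rem ≠ c := fun h => hcr h.symm
      have : c1.getD c 0 = (dt.count c : Int) := by
        rw [hc1get c, if_neg hcr, hcnt c]
        simp [hcr']
      rw [hc2]; split
      · rw [PySem.Dict.getD, get?_erase_of_ne _ _ _ hcr, ← PySem.Dict.getD, this]
      · exact this
  have hc2mem : ∀ c, c ∈ c2.keys ↔ c ∈ dt := by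
    intro c
    have hrek : (c1.getD rem 0 == 0) = true ↔ rem ∉ dt := by
      rw [hc1rem]; simp [List.count_eq_zero]
    constructor
    · intro hk
      rw [hc2] at hk; revert hk; split
      · next hz =>
          intro hk
          rcases (mem_keys_erase _ _ _).1 hk with ⟨h1, h2⟩
          rcases (hc1mem c).1 h1 with h | h
          · exact absurd h h2
          · rcases List.mem_cons.1 ((hmem c).1 h) with h' | h'
            · exact absurd h' h2
            · exact h'
      · next hz =>
          intro hk
          rcases (hc1mem c).1 hk with h | h
          · subst h
            by_contra hc
            exact hz (hrek.2 hc)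
          · rcases List.mem_cons.1 ((hmem c).1 h) with h' | h'
            · subst h'
              by_contra hc
              exact hz (hrek.2 hc)
            · exact h'
    · intro hcdt
      rw [hc2]; split
      · next hz =>
          have hcr : c ≠ rem := by
            rintro rfl; exact (hrek.1 hz) hcdt
          rw [mem_keys_erase]
          exact ⟨(hc1mem c).2 (Or.inr ((hmem c).2 (List.mem_cons_of_mem _ hcdt))), hcr⟩
      · exact (hc1mem c).2 (Or.inr ((hmem c).2 (List.mem_cons_of_mem _ hcdt)))
  refine ⟨PySem.Dict.nodup_keys_insert _ _ _ hc2nd, ?_, ?_⟩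
  · intro c
    rw [PySem.Dict.getD_modify]
    by_cases hcx : c = x
    · subst hcx; rw [if_pos rfl, hc2get]
      simp [List.count_append]
    · have hcx' : x ≠ c := fun h => hcx h.symm
      rw [if_neg hcx, hc2get]
      simp [List.count_append, hcx']
  · intro c
    rw [PySem.Dict.modify, PySem.Dict.mem_keys_insert, hc2mem]
    simp [List.mem_append, or_comm]

theorem loopA_eq_loopW (line : List Char) (fuel : Nat) :
    ∀ (dq : List Char) (counts : PySem.Dict Char Int) (i length : Int),
      CntInv dq counts →
      solveLoopA line fuel dq counts i length = solveLoopW line fuel dq i length := by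
  induction fuel with
  | zero => intro dq counts i length _; rfl
  | succ fuel ih =>
    intro dq counts i length hinv
    simp only [solveLoopA, solveLoopW]
    rw [size_eq_setLen dq counts hinv]
    split
    · match dq with
      | [] => rfl
      | rem :: dt =>
        cases PySem.List.pyGet? line i with
        | none => rfl
        | some x =>
          exact ih (dt ++ [x]) _ (i + 1) length (cnt_step rem x dt counts hinv)
    · rfl

theorem cntInv_counter (dq : List Char) : CntInv dq (PySem.Dict.counter dq) := by
  refine ⟨?_, ?_, ?_⟩
  · rw [PySem.Dict.keys_counter]; exact PySem.Set.nodup_ofList dq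
  · intro c; exact PySem.Dict.getD_counter dq c
  · intro c; rw [PySem.Dict.keys_counter, PySem.Set.mem_ofList]

-- the distinctness condition at start position j, on the Nat side
def condN (cs : List Char) (length : Int) (j : Nat) : Bool :=
  decide (length ≤ ((PySem.Set.ofList ((cs.drop j).take length.toNat)).length : Int))

theorem cond_imp_fit (cs : List Char) (length : Int) (j : Nat)
    (hpos : 0 < length) (h : condN cs length j = true) : j + length.toNat ≤ cs.length := by
  have hle := PySem.Set.length_ofList_le ((cs.drop j).take length.toNat)
  simp only [condN, decide_eq_true_eq] at h
  simp only [List.length_take, List.length_drop] at hle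
  omega

theorem find?_range_eq_some (q : Nat → Bool) (N k : Nat) (hk : k < N) (hq : q k = true)
    (hm : ∀ m, m < k → q m = false) : (List.range N).find? q = some k := by
  have hsplit : N = (k + 1) + (N - (k + 1)) := by omega
  rw [hsplit, List.range_add, List.find?_append, List.range_succ, List.find?_append]
  have h1 : (List.range k).find? q = none := by
    apply List.find?_eq_none.2
    intro m hmem
    rw [List.mem_range] at hmem
    simp [hm m hmem]
  simp [h1, hq]

theorem window_step (cs : List Char) (L j : Nat) (hL : 0 < L) (hjn : j + L < cs.length) :
    ∃ (h : j + L < cs.length),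
      ((cs.drop j).take L).tail ++ [cs[j + L]] = (cs.drop (j + 1)).take L := by
  refine ⟨hjn, ?_⟩
  have hdrop : cs.drop j = cs[j] :: cs.drop (j + 1) := by
    rw [List.drop_eq_getElem_cons (by omega)]
  rw [hdrop]
  obtain ⟨L', rfl⟩ : ∃ L', L = L' + 1 := ⟨L - 1, by omega⟩
  simp only [List.take_succ_cons, List.tail_cons]
  rw [List.take_add_one]
  have hlen : L' < (cs.drop (j + 1)).length := by
    rw [List.length_drop]; omega
  rw [List.getElem?_eq_getElem hlen]
  simp only [List.getElem_drop, Option.toList_some]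
  have : j + (L' + 1) = j + 1 + L' := by omega
  simp [this]

theorem window_nonempty (cs : List Char) (L j : Nat) (hL : 0 < L) (hj : j < cs.length) :
    (cs.drop j).take L ≠ [] := by
  simp only [ne_eq, List.take_eq_nil_iff, List.drop_eq_nil_iff]
  omega

theorem loopW_run (cs : List Char) (length : Int) (hpos : 0 < length) (k : Nat)
    (hkn : k + length.toNat ≤ cs.length)
    (hq : condN cs length k = true) (hm : ∀ m, m < k → condN cs length m = false) :
    ∀ fuel j, j ≤ k → k < j + fuel →
      solveLoopW cs fuel ((cs.drop j).take length.toNat) ((j : Int) + length) length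
        = (k : Int) + length := by
  intro fuel
  induction fuel with
  | zero => intro j hjk hfuel; omega
  | succ fuel ih =>
    intro j hjk hfuel
    simp only [solveLoopW]
    by_cases hjeq : j = k
    · subst hjeq
      simp only [condN, decide_eq_true_eq] at hq
      rw [if_neg (by omega)]
    · have hjlt : j < k := by omega
      have hcond := hm j hjlt
      simp only [condN, decide_eq_false_iff_not, not_le] at hcond
      rw [if_pos hcond]
      have hL : 0 < length.toNat := by omega
      have hjL : j + length.toNat < cs.length := by omega
      obtain ⟨_, hstep⟩ := window_step cs length.toNat j hL hjL
      have hne := window_nonempty cs length.toNat j hL (by omega)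
      match hw : (cs.drop j).take length.toNat with
      | [] => exact absurd hw hne
      | c :: wt =>
        have hget : PySem.List.pyGet? cs ((j : Int) + length) = some cs[j + length.toNat] := by
          have : (j : Int) + length = ((j + length.toNat : Nat) : Int) := by push_cast; omega
          rw [this, PySem.List.pyGet?_natCast]
          exact List.getElem?_eq_getElem hjL
        rw [hget]
        show solveLoopW cs fuel (wt ++ [cs[j + length.toNat]]) ((j : Int) + length + 1) length
          = (k : Int) + length
        have htail : wt ++ [cs[j + length.toNat]] = (cs.drop (j + 1)).take length.toNat := by
          rw [← hstep, hw]; rfl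
        rw [htail]
        have hi : (j : Int) + length + 1 = ((j + 1 : Nat) : Int) + length := by push_cast; ring
        rw [hi]
        exact ih (j + 1) (by omega) (by omega)

-- B's find? predicate coincides with condN on nonnegative length
theorem pred_eq_condN (cs : List Char) (length : Int) (hnn : 0 ≤ length) (j : Nat) :
    (decide (length ≤ ((PySem.Set.ofList
        (PySem.List.slice cs (some ((j : Int))) (some ((j : Int) + length)))).length : Int)))
      = condN cs length j := by
  have hslice : PySem.List.slice cs (some ((j : Int))) (some ((j : Int) + length))
      = (cs.drop j).take length.toNat := by
    rw [PySem.List.slice_toNat cs (by omega) (by omega)]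
    have h1 : ((j : Int)).toNat = j := by omega
    rw [h1]
    have h2 : ((j : Int) + length).toNat - j = length.toNat := by omega
    rw [h2]
  rw [hslice]
  rfl

-- ===== VERDICT (by name: the statement is the Claim_ definition above) =====
theorem solve_spec : Claim_equal_solve := by
  intro line length _ hpre
  unfold Spec_solve solve solve_alt
  set cs := line.toList with hcs
  rw [Pre_solve, ← hcs] at hpre
  show solveLoopA cs (cs.length + 1) (PySem.List.slice cs none (some length))
        (PySem.Dict.counter (PySem.List.slice cs none (some length))) length length
      = match (PySem.List.pyRange 0 ((cs.length : Int) + 1) 1).find?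
          (fun j => decide (length ≤ ((PySem.Set.ofList
              (PySem.List.slice cs (some j) (some (j + length)))).length : Int))) with
        | some j => j + length
        | none => 0
  by_cases hle : length ≤ 0
  · -- loop body never runs; B's generator accepts j = 0 immediately
    have hA : solveLoopA cs (cs.length + 1) (PySem.List.slice cs none (some length))
        (PySem.Dict.counter (PySem.List.slice cs none (some length))) length length = length := by
      simp only [solveLoopA]
      rw [if_neg (by omega)]
    have hB : (PySem.List.pyRange 0 ((cs.length : Int) + 1) 1).find?
        (fun j => decide (length ≤ ((PySem.Set.ofList
          (PySem.List.slice cs (some j) (some (j + length)))).length : Int))) = some 0 := by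
      rw [PySem.List.pyRange_one_cons (by omega),
        List.find?_cons_of_pos (by simp only [decide_eq_true_eq]; omega)]
    rw [hA, hB]
    show length = 0 + length
    omega
  · -- a distinct window exists; both sides compute (least such j) + length
    rcases hpre with h0 | ⟨jn, hjr, hfit, hnd⟩
    · omega
    have hqjn : condN cs length jn = true := by
      simp only [condN, decide_eq_true_eq]
      rw [PySem.Set.ofList_eq_self_of_nodup _ hnd]
      rw [List.length_take, List.length_drop]
      omega
    have hex : ∃ j, condN cs length j = true := ⟨jn, hqjn⟩
    have hqk : condN cs length (Nat.find hex) = true := Nat.find_spec hex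
    have hmin : ∀ m, m < Nat.find hex → condN cs length m = false := by
      intro m hmk
      exact Bool.eq_false_iff.2 (fun h => Nat.find_min hex hmk h)
    have hle' : 0 < length := by omega
    have hkn : Nat.find hex + length.toNat ≤ cs.length := cond_imp_fit cs length _ hle' hqk
    have hA : solveLoopA cs (cs.length + 1) (PySem.List.slice cs none (some length))
        (PySem.Dict.counter (PySem.List.slice cs none (some length))) length length
        = ((Nat.find hex : Nat) : Int) + length := by
      rw [loopA_eq_loopW cs _ _ _ _ _ (cntInv_counter _)]
      have hslice : PySem.List.slice cs none (some length) = (cs.drop 0).take length.toNat := by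
        rw [PySem.List.slice_to cs (by omega)]
        simp
      rw [hslice]
      have := loopW_run cs length hle' (Nat.find hex) hkn hqk hmin (cs.length + 1) 0
        (by omega) (by omega)
      simpa using this
    have hB : (PySem.List.pyRange 0 ((cs.length : Int) + 1) 1).find?
        (fun j => decide (length ≤ ((PySem.Set.ofList
          (PySem.List.slice cs (some j) (some (j + length)))).length : Int)))
        = some (((Nat.find hex : Nat) : Int)) := by
      rw [PySem.List.pyRange_one 0 ((cs.length : Int) + 1), List.find?_map]
      have hcomp : ((fun j => decide (length ≤ ((PySem.Set.ofList
            (PySem.List.slice cs (some j) (some (j + length)))).length : Int)))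
            ∘ (fun t : Nat => (0 : Int) + (t : Int))) = fun t : Nat => condN cs length t := by
        funext t
        simp only [Function.comp, zero_add]
        exact pred_eq_condN cs length (by omega) t
      rw [hcomp]
      have hNk : ((cs.length : Int) + 1 - 0).toNat = cs.length + 1 := by omega
      rw [hNk,
        find?_range_eq_some (condN cs length) (cs.length + 1) (Nat.find hex) (by omega) hqk hmin]
      simp
    rw [hA, hB]
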